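-- pv_equiv track=rewrite | github.com/o3de/o3de | scripts/o3de/o3de/export_project.py | extract_cmake_custom_args
-- ===== SOURCE A (Python) =====
-- from typing import List
--
-- class ExportProjectError(RuntimeError):
--     """
--     Define an error related to the runtime execution of export project so to handle messaging properly
--     """
--     pass
--
-- def extract_cmake_custom_args(arg_list: List[str])->tuple:
--     """
--     Given an argument list, strip out any custom cmake configure/build args into there own lists and return:
--      - List of args that are not custom cmake (configure/build) arguments
--      - List of custom cmake configure arguments
--      - List of custom cmake build arguments
--      - Arg Parse epilogue string to display the custom arguments and how to use them
--
--      refer to CUSTOM_CMAKE_ARG_HELP_EPILOGUE for the help description for the arg options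
--
--     :param arg_list: The original argument list to extract the arguments from
--     :return     Tuple of arguments and the epilogue string as described in the description
--     """
--
--     export_process_args = []
--     cmake_configure_args = []
--     cmake_build_args = []
--     in_cca = False
--     in_cba = False
--
--     for arg in arg_list:
--         if not in_cca and not in_cba:
--             if arg in ('-cca', '--cmake-configure-arg'):
--                 in_cca = True
--                 in_cba = False
--             elif arg in ('-cba', '--cmake-build-arg'):
--                 in_cba = True
--                 in_cca = False
--             elif arg == '/':
--                 raise ExportProjectError("Invalid argument '/'. This argument marks terminator for the '-cca'  or '-cba' argument, but is not part of that argument")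
--             else:
--                 export_process_args.append(arg)
--         elif in_cca:
--             if arg == '/':
--                 in_cca = False
--             elif arg in ('-cba', '--cmake-build-arg'):
--                 in_cca = False
--                 in_cba = True
--             elif arg not in ('-cca', '--cmake-configure-arg'):
--                 cmake_configure_args.append(arg)
--         elif in_cba:
--             if arg == '/':
--                 in_cba = False
--             elif arg in ('-cca', '--cmake-configure-arg'):
--                 in_cca = True
--                 in_cba = False
--             elif arg not in ('-cba', '--cmake-build-arg'):
--                 cmake_build_args.append(arg)
--         else:
--             export_process_args.append(arg)
--
--     return export_process_args, cmake_configure_args, cmake_build_args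
-- ===== SOURCE B (Python) =====
-- from typing import List
--
-- class ExportProjectError(RuntimeError):
--     pass
--
-- def extract_cmake_custom_args(arg_list: List[str]) -> tuple:
--     CCA = ('-cca', '--cmake-configure-arg')
--     CBA = ('-cba', '--cmake-build-arg')
--     export_process_args, cmake_configure_args, cmake_build_args = [], [], []
--     i, n = 0, len(arg_list)
--     while i < n:  # neutral scan
--         a = arg_list[i]
--         if a == '/':
--             raise ExportProjectError("Invalid argument '/'. This argument marks terminator for the '-cca'  or '-cba' argument, but is not part of that argument")
--         if a in CCA or a in CBA:
--             mode_cca = a in CCA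
--             i += 1
--             while i < n and arg_list[i] != '/':  # collect one custom-arg group until its terminator
--                 a = arg_list[i]
--                 if a in CCA:
--                     mode_cca = True
--                 elif a in CBA:
--                     mode_cca = False
--                 elif mode_cca:
--                     cmake_configure_args.append(a)
--                 else:
--                     cmake_build_args.append(a)
--                 i += 1
--             i += 1  # skip the '/' terminator (or run off the end)
--         else:
--             export_process_args.append(a)
--             i += 1
--     return export_process_args, cmake_configure_args, cmake_build_args
-- ===== Notes on version B (the rewrite author's own statement) =====
-- stated objective: simpler
-- what changed: Replaces A's single flat loop over two boolean mode flags (in_cca/in_cba) with a two-level scan: an outer loop over neutral arguments and an inner loop that collects one custom-arg group up to its '/' terminator, so the neutral-state branching disappears from the collection phase.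
import Mathlib
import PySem

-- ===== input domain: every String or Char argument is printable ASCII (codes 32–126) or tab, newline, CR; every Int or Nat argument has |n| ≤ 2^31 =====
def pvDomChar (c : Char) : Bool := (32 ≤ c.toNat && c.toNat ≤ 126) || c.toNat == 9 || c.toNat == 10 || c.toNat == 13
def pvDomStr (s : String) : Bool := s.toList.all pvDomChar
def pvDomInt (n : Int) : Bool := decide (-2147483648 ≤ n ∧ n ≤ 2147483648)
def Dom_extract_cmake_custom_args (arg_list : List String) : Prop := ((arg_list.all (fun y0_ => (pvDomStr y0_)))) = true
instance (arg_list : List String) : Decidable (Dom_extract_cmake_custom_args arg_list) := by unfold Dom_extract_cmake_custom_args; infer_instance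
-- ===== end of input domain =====

-- B replaces A's flat loop with two boolean mode flags by a two-level scan (neutral outer
-- loop, inner group-collection loop until the '/' terminator); objective: simpler.


-- ===== PORT A =====
-- loop of A: state = (export_process_args, cmake_configure_args, cmake_build_args, in_cca, in_cba).
-- On '/' in the neutral state Python A raises ExportProjectError; that input is excluded by
-- Pre_ below and the port returns ([], [], []) there.
def pvGoA : List String → List String → List String → List String → Bool → Bool → List String × List String × List String
  | [], e, c, b, _, _ => (e, c, b)
  | arg :: rest, e, c, b, in_cca, in_cba =>
    if !in_cca && !in_cba then
      if arg = "-cca" ∨ arg = "--cmake-configure-arg" then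
        pvGoA rest e c b true false
      else if arg = "-cba" ∨ arg = "--cmake-build-arg" then
        pvGoA rest e c b false true
      else if arg = "/" then ([], [], [])  -- raise ExportProjectError (outside Pre_)
      else pvGoA rest (e ++ [arg]) c b in_cca in_cba
    else if in_cca then
      if arg = "/" then pvGoA rest e c b false in_cba
      else if arg = "-cba" ∨ arg = "--cmake-build-arg" then pvGoA rest e c b false true
      else if ¬ (arg = "-cca" ∨ arg = "--cmake-configure-arg") then pvGoA rest e (c ++ [arg]) b in_cca in_cba
      else pvGoA rest e c b in_cca in_cba
    else if in_cba then
      if arg = "/" then pvGoA rest e c b in_cca false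
      else if arg = "-cca" ∨ arg = "--cmake-configure-arg" then pvGoA rest e c b true false
      else if ¬ (arg = "-cba" ∨ arg = "--cmake-build-arg") then pvGoA rest e c (b ++ [arg]) in_cca in_cba
      else pvGoA rest e c b in_cca in_cba
    else pvGoA rest (e ++ [arg]) c b in_cca in_cba

def extract_cmake_custom_args (arg_list : List String) : List String × List String × List String :=
  pvGoA arg_list [] [] [] false false

-- ===== PORT B =====
-- outer (neutral) loop and inner (group-collection) loop of Source B as mutual recursion.
mutual
def pvBNeutral : List String → List String → List String → List String → List String × List String × List String
  | [], e, c, b => (e, c, b)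
  | a :: rest, e, c, b =>
    if a = "/" then ([], [], [])  -- raise ExportProjectError (outside Pre_)
    else if a = "-cca" ∨ a = "--cmake-configure-arg" ∨ a = "-cba" ∨ a = "--cmake-build-arg" then
      pvBCollect (a = "-cca" ∨ a = "--cmake-configure-arg") rest e c b
    else pvBNeutral rest (e ++ [a]) c b

def pvBCollect : Bool → List String → List String → List String → List String → List String × List String × List String
  | _, [], e, c, b => (e, c, b)
  | mode_cca, a :: rest, e, c, b =>
    if a = "/" then pvBNeutral rest e c b
    else if a = "-cca" ∨ a = "--cmake-configure-arg" then pvBCollect true rest e c b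
    else if a = "-cba" ∨ a = "--cmake-build-arg" then pvBCollect false rest e c b
    else if mode_cca then pvBCollect mode_cca rest e (c ++ [a]) b
    else pvBCollect mode_cca rest e c (b ++ [a])
end

def extract_cmake_custom_args_alt (arg_list : List String) : List String × List String × List String :=
  pvBNeutral arg_list [] [] []

-- ===== PRECONDITION & SPEC =====
-- Pre_ excludes exactly the inputs on which Python A raises ExportProjectError: a '/' token
-- with no mode token ('-cca'/'--cmake-configure-arg'/'-cba'/'--cmake-build-arg') since the
-- previous '/' (or since the start).  B raises there too.
def Pre_extract_cmake_custom_args (arg_list : List String) : Prop :=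
  ∀ i ∈ List.range arg_list.length, arg_list.getD i "" = "/" →
    ∃ j ∈ List.range i,
      (arg_list.getD j "" = "-cca" ∨ arg_list.getD j "" = "--cmake-configure-arg" ∨
       arg_list.getD j "" = "-cba" ∨ arg_list.getD j "" = "--cmake-build-arg") ∧
      ∀ k ∈ List.range i, j < k → arg_list.getD k "" ≠ "/"
instance (arg_list : List String) : Decidable (Pre_extract_cmake_custom_args arg_list) := by
  unfold Pre_extract_cmake_custom_args; infer_instance

def pvWitness_extract_cmake_custom_args : List String :=
  ["a", "-cca", "-DFOO=1", "/", "b", "-cba", "c", "/", "d"]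

def Spec_extract_cmake_custom_args (arg_list : List String) (out : List String × List String × List String) : Prop := out = extract_cmake_custom_args_alt arg_list
instance (arg_list : List String) (out : List String × List String × List String) : Decidable (Spec_extract_cmake_custom_args arg_list out) := by unfold Spec_extract_cmake_custom_args; infer_instance

-- ===== CLAIM (what is proved, stated in full; the proofs are below) =====
def Claim_equal_extract_cmake_custom_args : Prop := ∀ (arg_list : List String), Dom_extract_cmake_custom_args arg_list → Pre_extract_cmake_custom_args arg_list → Spec_extract_cmake_custom_args arg_list (extract_cmake_custom_args arg_list)

-- ===== LEMMAS AND PROOFS =====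
-- The two loops agree from corresponding states (A's flag pair ↔ B's current group):
-- (false,false) ↔ neutral, (true,false) ↔ collecting configure, (false,true) ↔ collecting build.
theorem pvGoA_eq (l : List String) : ∀ e c b,
    pvGoA l e c b false false = pvBNeutral l e c b ∧
    pvGoA l e c b true false = pvBCollect true l e c b ∧
    pvGoA l e c b false true = pvBCollect false l e c b := by
  induction l with
  | nil => intro e c b; simp [pvGoA, pvBNeutral, pvBCollect]
  | cons a rest ih =>
    intro e c b
    refine ⟨?_, ?_, ?_⟩ <;>
      simp only [pvGoA, pvBNeutral, pvBCollect] <;>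
      split_ifs <;>
      first
        | rfl
        | exact (ih _ _ _).1
        | exact (ih _ _ _).2.1
        | exact (ih _ _ _).2.2
        | (simp_all; done)
        | (rcases ‹a = "-cca" ∨ a = "--cmake-configure-arg"› with rfl | rfl <;> simp_all)

-- ===== VERDICT (by name: the statement is the Claim_ definition above) =====
theorem extract_cmake_custom_args_spec : Claim_equal_extract_cmake_custom_args := by
  intro arg_list _ _
  unfold Spec_extract_cmake_custom_args extract_cmake_custom_args extract_cmake_custom_args_alt
  exact (pvGoA_eq arg_list [] [] []).1
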